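-- pv_equiv track=rewrite | github.com/joaovictorsaraujo/Programacao-II | exercicios/exercícios_dicionários/libdict.py | menores_lst
-- ===== SOURCE A (Python) =====
-- def menores_lst(dic): #15
--     b = False
--     lst = []
--     for k in dic:
--         if b == False: #Define o primeiro valor da lista como menor tamanho
--             m = len(dic[k])
--             b = True
--         elif len(dic[k]) < m: #Se o próximo valor tiver um tamanho menor, adiciona a chave na lista
--             lst.append(k)
--         m = len(dic[k])
--     return lst
-- ===== SOURCE B (Python) =====
-- def menores_lst(dic):
--     # Divide and conquer: split the items in half, solve each half recursively,
--     # and insert the boundary key when the right half's first value is shorter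
--     # than the left half's last value.
--     def go(seg):
--         if len(seg) <= 1:
--             return []
--         mid = len(seg) // 2
--         left, right = seg[:mid], seg[mid:]
--         b = [right[0][0]] if len(right[0][1]) < len(left[-1][1]) else []
--         return go(left) + b + go(right)
--     return go(list(dic.items()))
-- ===== Notes on version B (the rewrite author's own statement) =====
-- stated objective: alternative
-- what changed: Replaces A's single-pass state machine (first-element flag plus running previous-length variable) by a divide-and-conquer recursion that splits the item list in half, solves each half independently, and adds the boundary key by comparing the right half's first value length with the left half's last.
import Mathlib
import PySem

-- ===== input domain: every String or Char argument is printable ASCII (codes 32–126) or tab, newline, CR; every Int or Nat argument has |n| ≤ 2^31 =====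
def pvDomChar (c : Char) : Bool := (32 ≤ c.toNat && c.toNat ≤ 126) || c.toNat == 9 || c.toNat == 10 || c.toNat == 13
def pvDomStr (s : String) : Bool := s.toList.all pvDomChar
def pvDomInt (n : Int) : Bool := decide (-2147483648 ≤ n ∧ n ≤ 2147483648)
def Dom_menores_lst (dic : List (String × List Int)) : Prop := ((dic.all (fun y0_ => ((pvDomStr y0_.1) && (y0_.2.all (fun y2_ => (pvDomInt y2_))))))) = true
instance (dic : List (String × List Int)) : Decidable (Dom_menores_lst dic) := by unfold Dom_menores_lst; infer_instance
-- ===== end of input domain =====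

-- B replaces A's flag/previous-length state machine by a divide-and-conquer over the item list (alternative decomposition, not faster).


-- ===== PORT A =====
-- Port of A: fold carrying (b, m, lst) exactly as the Python state machine does.
def menores_lst (dic : List (String × List Int)) : List String :=
  (dic.foldl (fun s kv =>
      match s with
      | (false, _, lst) => (true, kv.2.length, lst)
      | (true, m, lst) =>
          (true, kv.2.length, if kv.2.length < m then lst ++ [kv.1] else lst))
    ((false : Bool), (0 : Nat), ([] : List String))).2.2

-- ===== PORT B =====
-- Port of B's helper go: split in half, recurse on each half, boundary key in the middle.
-- right[0] / left[-1] always exist when the branch is taken; head?/getLast? make that total.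
def goB (xs : List (String × List Int)) : List String :=
  if xs.length ≤ 1 then []
  else
    let mid := xs.length / 2
    let l := xs.take mid
    let r := xs.drop mid
    let b := match r.head?, l.getLast? with
      | some q, some p => if q.2.length < p.2.length then [q.1] else []
      | _, _ => []
    goB l ++ b ++ goB r
termination_by xs.length
decreasing_by
  · simp only [List.length_take]; omega
  · simp only [List.length_drop]; omega

def menores_lst_alt (dic : List (String × List Int)) : List String := goB dic

-- ===== PRECONDITION & SPEC =====
def Spec_menores_lst (dic : List (String × List Int)) (out : List String) : Prop := out = menores_lst_alt dic
instance (dic : List (String × List Int)) (out : List String) : Decidable (Spec_menores_lst dic out) := by unfold Spec_menores_lst; infer_instance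

-- ===== CLAIM (what is proved, stated in full; the proofs are below) =====
def Claim_equal_menores_lst : Prop := ∀ (dic : List (String × List Int)), Dom_menores_lst dic → Spec_menores_lst dic (menores_lst dic)

-- ===== LEMMAS AND PROOFS =====

-- reference function: keys whose value is shorter than the previous key's value
def adjP : List (String × List Int) → List String
  | [] => []
  | [_] => []
  | x :: y :: t => (if y.2.length < x.2.length then [y.1] else []) ++ adjP (y :: t)

theorem adjP_append (l r : List (String × List Int)) (hl : l ≠ []) (hr : r ≠ []) :
    adjP (l ++ r) = adjP l ++
      (match r.head?, l.getLast? with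
        | some q, some p => if q.2.length < p.2.length then [q.1] else []
        | _, _ => []) ++ adjP r := by
  induction l with
  | nil => exact absurd rfl hl
  | cons x l ih =>
    cases l with
    | nil =>
      cases r with
      | nil => exact absurd rfl hr
      | cons q t => simp [adjP]
    | cons y t =>
      have h := ih (by simp)
      simp only [List.cons_append, adjP] at *
      rw [h]
      cases r with
      | nil => exact absurd rfl hr
      | cons q s => simp [List.getLast?_cons_cons]

theorem goB_eq_adjP (xs : List (String × List Int)) : goB xs = adjP xs := by
  fun_induction goB xs with
  | case1 xs h =>
    match xs, h with
    | [], _ => rfl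
    | [_], _ => rfl
  | case2 xs h mid l r b ihl ihr =>
    have hlen : 2 ≤ xs.length := by omega
    have hl : l ≠ [] := by
      have : l.length = mid := by simp [l, mid]; omega
      intro he; rw [he] at this; simp at this; omega
    have hr : r ≠ [] := by
      have : r.length = xs.length - mid := by simp [r, mid]
      intro he; rw [he] at this; simp at this; omega
    have hsplit : xs = l ++ r := (List.take_append_drop mid xs).symm
    rw [ihl, ihr, hsplit, adjP_append l r hl hr]
    simp [b]

-- A's fold after the first element equals adjP with the previous element prepended
theorem foldA_true (t : List (String × List Int)) :
    ∀ (p : String × List Int) (lst : List String),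
      ((t.foldl (fun s kv =>
          match s with
          | (false, _, lst) => (true, kv.2.length, lst)
          | (true, m, lst) =>
              (true, kv.2.length, if kv.2.length < m then lst ++ [kv.1] else lst))
        ((true : Bool), p.2.length, lst)).2.2) = lst ++ adjP (p :: t) := by
  induction t with
  | nil => intro p lst; simp [adjP]
  | cons kv t ih =>
    intro p lst
    simp only [List.foldl_cons, adjP]
    by_cases h : kv.2.length < p.2.length <;> simp [h, ih kv]

-- ===== VERDICT (by name: the statement is the Claim_ definition above) =====
theorem menores_lst_spec : Claim_equal_menores_lst := by
  intro dic _
  unfold Spec_menores_lst menores_lst menores_lst_alt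
  rw [goB_eq_adjP]
  cases dic with
  | nil => rfl
  | cons p t => simpa using foldA_true t p []
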